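-- pv_equiv track=rewrite | github.com/csaran1/ProjectYolo-Basic | test.py | analyze_traffic
-- ===== SOURCE A (Python) =====
-- def analyze_traffic(objects):
--     # Assuming the lane divisions are known
--     lane_divisions = [50, 150, 250]  # Example lane divisions, adjust according to your video
--
--     # Initialize dictionary to store lane information
--     lane_info = {}
--
--     for obj in objects:
--         x, y, w, h = obj
--         lane_found = False
--         for i, division in enumerate(lane_divisions):
--             if x < division:
--                 lane_info[i + 1] = obj  # Assuming lane numbering starts from 1
--                 lane_found = True
--                 break
--         if not lane_found:
--             lane_info[len(lane_divisions) + 1] = obj  # Object is beyond defined lanes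
--
--     return lane_info
-- ===== SOURCE B (Python) =====
-- def analyze_traffic(objects):
--     # closed-form lane index (count of boundaries <= x, plus 1) via a dict comprehension;
--     # no first-match scan, no found-flag
--     return {1 + (x >= 50) + (x >= 150) + (x >= 250): [x, y, w, h]
--             for x, y, w, h in objects}
-- ===== Notes on version B (the rewrite author's own statement) =====
-- stated objective: idiomatic
-- what changed: Replaces the first-match break loop with a found-flag by a closed-form lane index (1 plus the count of boundaries <= x, computed arithmetically) inside a single dict comprehension.
import Mathlib
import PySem

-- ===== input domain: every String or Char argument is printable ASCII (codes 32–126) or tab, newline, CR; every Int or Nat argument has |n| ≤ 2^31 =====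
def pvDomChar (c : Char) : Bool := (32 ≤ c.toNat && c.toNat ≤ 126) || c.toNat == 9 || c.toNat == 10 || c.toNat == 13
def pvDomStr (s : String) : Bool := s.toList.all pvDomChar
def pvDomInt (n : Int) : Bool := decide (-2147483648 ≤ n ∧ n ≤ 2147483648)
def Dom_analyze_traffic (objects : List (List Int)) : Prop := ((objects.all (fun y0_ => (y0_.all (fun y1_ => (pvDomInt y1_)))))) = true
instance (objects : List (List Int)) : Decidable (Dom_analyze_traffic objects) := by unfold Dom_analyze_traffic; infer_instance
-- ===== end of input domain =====

-- B replaces A's first-match break loop (with a found-flag) by a closed-form arithmetic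
-- lane index in a single dict comprehension; equivalence of the return value is proved
-- on inputs whose objects all have length 4 (Python unpacking raises otherwise).


-- ===== PORT A =====
def analyze_traffic (objects : List (List Int)) : List (Int × List Int) :=
  let lane_divisions : List Int := [50, 150, 250]
  let lane_info : PySem.Dict Int (List Int) :=
    objects.foldl (fun lane_info obj =>
      match obj with
      | [x, _y, _w, _h] =>
        -- inner for-loop with break, modelled as an option-valued fold (lane_found/break)
        match (PySem.List.enumerate lane_divisions).foldl (fun found p =>
            match found with
            | some _ => found
            | none => if x < p.2 then some (p.1 + 1) else none) none with
        | some lane => lane_info.insert lane obj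
        | none => lane_info.insert ((lane_divisions.length : Int) + 1) obj
      | _ => lane_info  -- unpacking raises ValueError in Python; excluded by Pre_
      ) PySem.Dict.empty
  lane_info.items

-- ===== PORT B =====
def analyze_traffic_alt (objects : List (List Int)) : List (Int × List Int) :=
  (objects.foldl (fun d obj =>
    -- Python's 'for x, y, w, h in objects' unpack; length ≠ 4 raises ValueError (excluded by Pre_)
    if obj.length = 4 then
      let x := obj.getD 0 0
      let y := obj.getD 1 0
      let w := obj.getD 2 0
      let h := obj.getD 3 0
      d.insert (1 + (if x ≥ 50 then (1 : Int) else 0) + (if x ≥ 150 then 1 else 0)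
                  + (if x ≥ 250 then 1 else 0)) [x, y, w, h]
    else d) PySem.Dict.empty).items

-- ===== PRECONDITION & SPEC =====
-- Pre_ excludes exactly the inputs where Python's 'x, y, w, h = obj' raises ValueError (both in A and in B).
def Pre_analyze_traffic (objects : List (List Int)) : Prop :=
  ∀ obj ∈ objects, obj.length = 4
instance (objects : List (List Int)) : Decidable (Pre_analyze_traffic objects) := by
  unfold Pre_analyze_traffic; infer_instance
def pvWitness_analyze_traffic : List (List Int) := [[10, 0, 5, 5], [150, 1, 2, 3], [999, 0, 0, 1]]

def Spec_analyze_traffic (objects : List (List Int)) (out : List (Int × List Int)) : Prop := out = analyze_traffic_alt objects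
instance (objects : List (List Int)) (out : List (Int × List Int)) : Decidable (Spec_analyze_traffic objects out) := by unfold Spec_analyze_traffic; infer_instance

-- ===== CLAIM (what is proved, stated in full; the proofs are below) =====
def Claim_equal_analyze_traffic : Prop := ∀ (objects : List (List Int)), Dom_analyze_traffic objects → Pre_analyze_traffic objects → Spec_analyze_traffic objects (analyze_traffic objects)

-- ===== LEMMAS AND PROOFS =====

theorem analyze_traffic_spec : Claim_equal_analyze_traffic := by
  intro objects _ hpre
  unfold Spec_analyze_traffic analyze_traffic analyze_traffic_alt
  simp only []
  congr 1
  apply PySem.List.foldl_congr_mem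
  intro d obj hmem
  have h4 := hpre obj hmem
  match obj, h4 with
  | [x, y, w, h], _ =>
    simp only [PySem.List.enumerate_cons, PySem.List.enumerate_nil, List.foldl, List.getD]
    by_cases h1 : x < 50 <;> by_cases h2 : x < 150 <;> by_cases h3 : x < 250 <;>
      simp [h1, h2, h3] <;> (congr 1; omega)
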